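-- pv_equiv track=rewrite | github.com/seo-dong-hyeon/Algorithm | Softeer/현대오토/test/test3.py | solution
-- ===== SOURCE A (Python) =====
-- def recursive(p, idx, num, chkList, answer):
--     for idx in range(len(p)):
--         if chkList[idx] == False and p[idx] > num:
--             chkList[idx] = True
--             answer += recursive(p, idx, p[idx], chkList, answer)
--             return answer + 1
--     return answer
--
-- def solution(p):
--     answer = 0
--     p.sort()
--     chkList = [False] * len(p)
--
--     for i in range(len(p)):
--         if chkList[i] == False:
--             chkList[i] = True
--             answer += recursive(p, i, p[i], chkList, 0)
--
--     return answer
-- ===== SOURCE B (Python) =====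
-- def solution(p):
--     # answer = len(p) - (max multiplicity of any value): the greedy partition of the
--     # sorted list into strictly increasing chains has exactly max-multiplicity chains.
--     counts = {}
--     best = 0
--     for x in p:
--         c = counts.get(x, 0) + 1
--         counts[x] = c
--         if c > best:
--             best = c
--     return len(p) - best
-- ===== Notes on version B (the rewrite author's own statement) =====
-- stated objective: faster
-- what changed: Replaced the O(n^2) sort + recursive greedy chain-partition (answer = sum over chains of chain length - 1) by a single hash-map counting pass using the identity answer = len(p) - max multiplicity of any value; B also does not mutate p (A sorts it in place).
import Mathlib
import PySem

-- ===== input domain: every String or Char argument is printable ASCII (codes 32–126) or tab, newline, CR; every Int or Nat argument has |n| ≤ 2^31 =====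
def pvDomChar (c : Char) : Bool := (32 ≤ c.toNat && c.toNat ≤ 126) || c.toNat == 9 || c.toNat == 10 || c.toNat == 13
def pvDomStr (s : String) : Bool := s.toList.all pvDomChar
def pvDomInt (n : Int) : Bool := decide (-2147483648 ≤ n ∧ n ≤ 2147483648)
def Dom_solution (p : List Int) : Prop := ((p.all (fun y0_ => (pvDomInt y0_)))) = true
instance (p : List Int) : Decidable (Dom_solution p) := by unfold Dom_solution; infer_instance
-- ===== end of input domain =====

-- B replaces A's sort + greedy chain-partition recursion by one counting pass (len minus max
-- multiplicity). Note: Python A sorts its argument in place; the equivalence is about the return value.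

-- ===== PORT A =====
-- the 'for idx in range(len(p))' loop of `recursive` returns at the first index satisfying the test
def findIdxA (p : List Int) (chk : List Bool) (num : Int) : Option Nat :=
  (List.range p.length).find? (fun idx => (chk.getD idx true == false) && decide (num < p.getD idx 0))

-- `recursive`; chkList is mutated in Python, so the port threads it through; fuel only makes the
-- recursion total (each call marks one entry True, so p.length fuel is never exhausted)
def recursiveA : Nat → List Int → Int → List Bool → Int → Int × List Bool
  | 0, _, _, chk, answer => (answer, chk)
  | fuel+1, p, num, chk, answer =>
    match findIdxA p chk num with
    | none => (answer, chk)
    | some idx =>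
      let res := recursiveA fuel p (p.getD idx 0) (chk.set idx true) answer
      (answer + res.1 + 1, res.2)

-- the 'for i in range(len(p))' loop of `solution`
def solLoopA (p : List Int) (i : Nat) (chk : List Bool) (answer : Int) : Int :=
  if _h : i < p.length then
    if chk.getD i true = false then
      let res := recursiveA p.length p (p.getD i 0) (chk.set i true) 0
      solLoopA p (i+1) res.2 (answer + res.1)
    else solLoopA p (i+1) chk answer
  else answer
termination_by p.length - i

def solution (p : List Int) : Int :=
  let ps := PySem.List.sorted p (fun x => x) false
  solLoopA ps 0 (List.replicate ps.length false) 0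

-- ===== PORT B =====
def solution_alt (p : List Int) : Int :=
  (p.length : Int) - (p.foldl (fun (st : PySem.Dict Int Int × Int) x =>
      let c := st.1.getD x 0 + 1
      (st.1.insert x c, if st.2 < c then c else st.2)) (PySem.Dict.empty, 0)).2

-- ===== PRECONDITION & SPEC =====
-- Pre_ excludes only inputs on which Python A hits CPython's 1000-frame recursion limit and
-- raises RecursionError: A's chain recursion nests one frame per distinct value, and a fresh
-- interpreter first crashes at 998 distinct values; the bound 900 sits at that real limit minus
-- a margin for the caller's own stack frames (each caller frame lowers the threshold by one).
def Pre_solution (p : List Int) : Prop := (PySem.Set.ofList p).length ≤ 900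
instance (p : List Int) : Decidable (Pre_solution p) := by unfold Pre_solution; infer_instance

def pvWitness_solution : List Int := [3, 1, 2, 1]

def Spec_solution (p : List Int) (out : Int) : Prop := out = solution_alt p
instance (p : List Int) (out : Int) : Decidable (Spec_solution p out) := by unfold Spec_solution; infer_instance

-- ===== CLAIM (what is proved, stated in full; the proofs are below) =====
def Claim_equal_solution : Prop := ∀ (p : List Int), Dom_solution p → Pre_solution p → Spec_solution p (solution p)

-- ===== LEMMAS AND PROOFS =====

-- values at the unchecked positions, in order (the "remaining multiset" of A's state)
def rem : List Int → List Bool → List Int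
  | x :: p, b :: chk => if b then rem p chk else x :: rem p chk
  | _, _ => []

def firstAbove? (num : Int) : List Int → Option Int
  | [] => none
  | x :: xs => if num < x then some x else firstAbove? num xs

def removeAbove1 (num : Int) : List Int → List Int
  | [] => []
  | x :: xs => if num < x then xs else x :: removeAbove1 num xs

-- A's chain recursion, abstracted to the remaining-values list
def chainAbs : Nat → Int → List Int → Int × List Int
  | 0, _, R => (0, R)
  | fuel+1, num, R =>
    match firstAbove? num R with
    | none => (0, R)
    | some v =>
      let res := chainAbs fuel v (removeAbove1 num R)
      (res.1 + 1, res.2)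

def dAbove (num : Int) : List Int → Int
  | [] => 0
  | x :: xs => if num < x then 1 + dAbove x xs else dAbove num xs

def eraseAbove (num : Int) : List Int → List Int
  | [] => []
  | x :: xs => if num < x then eraseAbove x xs else x :: eraseAbove num xs

-- A's outer loop, abstracted
def outerAbs : Nat → List Int → Int
  | 0, _ => 0
  | _+1, [] => 0
  | fuel+1, x :: xs => dAbove x xs + outerAbs fuel (eraseAbove x xs)

def maxCnt (L : List Int) : Nat := L.toFinset.sup fun y => L.count y

lemma findIdxA_cons (x : Int) (b : Bool) (p : List Int) (chk : List Bool) (num : Int) :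
    findIdxA (x :: p) (b :: chk) num =
      if b = false ∧ num < x then some 0 else (findIdxA p chk num).map (· + 1) := by
  unfold findIdxA
  rw [List.length_cons, List.range_succ_eq_map]
  by_cases hbx : (b = false ∧ num < x)
  · rw [if_pos hbx]
    apply List.find?_cons_of_pos
    simp [hbx.1, hbx.2]
  · rw [if_neg hbx]
    rw [List.find?_cons_of_neg]
    · rw [List.find?_map]
      rfl
    · simp only [List.getD_cons_zero, List.getD_cons_zero]
      by_cases hb : b = false <;> by_cases hx : num < x <;> simp [hb, hx] <;> tauto

lemma find_step : ∀ (p : List Int) (chk : List Bool) (num : Int), chk.length = p.length →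
    (findIdxA p chk num = none → firstAbove? num (rem p chk) = none)
    ∧ (∀ idx, findIdxA p chk num = some idx →
        firstAbove? num (rem p chk) = some (p.getD idx 0)
        ∧ rem p (chk.set idx true) = removeAbove1 num (rem p chk)) := by
  intro p
  induction p with
  | nil =>
    intro chk num h
    have hc : chk = [] := List.eq_nil_of_length_eq_zero (by simpa using h)
    subst hc
    constructor
    · intro _; simp [rem, firstAbove?]
    · intro idx hidx; simp [findIdxA] at hidx
  | cons x p ih =>
    intro chk num h
    cases chk with
    | nil => simp at h
    | cons b chk =>
      have h' : chk.length = p.length := by simpa using h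
      rw [findIdxA_cons]
      by_cases hbx : (b = false ∧ num < x)
      · rw [if_pos hbx]
        obtain ⟨hb, hx⟩ := hbx
        subst hb
        constructor
        · intro hnone; simp at hnone
        · intro idx hidx
          have hidx0 : idx = 0 := by simpa using hidx.symm
          subst hidx0
          refine ⟨?_, ?_⟩
          · simp [rem, firstAbove?, hx]
          · simp [rem, removeAbove1, hx, List.set]
      · rw [if_neg hbx]
        cases b with
        | false =>
          have hx : ¬ num < x := fun hlt => hbx ⟨rfl, hlt⟩
          constructor
          · intro hnone
            have hn : findIdxA p chk num = none := by simpa using hnone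
            have := (ih chk num h').1 hn
            simp [rem, firstAbove?, hx, this]
          · intro idx hidx
            obtain ⟨j, hj, rfl⟩ : ∃ j, findIdxA p chk num = some j ∧ idx = j + 1 := by
              cases hfi : findIdxA p chk num with
              | none => rw [hfi] at hidx; simp at hidx
              | some j => rw [hfi] at hidx; simp at hidx; exact ⟨j, rfl, hidx.symm⟩
            obtain ⟨h1, h2⟩ := (ih chk num h').2 j hj
            refine ⟨?_, ?_⟩
            · simp only [rem, if_neg (by simp : ¬ (false : Bool) = true), firstAbove?, if_neg hx,
                List.getD_cons_succ]
              simpa using h1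
            · simp only [List.set, rem, if_neg (by simp : ¬ (false : Bool) = true),
                removeAbove1, if_neg hx]
              simpa using h2
        | true =>
          constructor
          · intro hnone
            have hn : findIdxA p chk num = none := by simpa using hnone
            have := (ih chk num h').1 hn
            simpa [rem] using this
          · intro idx hidx
            obtain ⟨j, hj, rfl⟩ : ∃ j, findIdxA p chk num = some j ∧ idx = j + 1 := by
              cases hfi : findIdxA p chk num with
              | none => rw [hfi] at hidx; simp at hidx
              | some j => rw [hfi] at hidx; simp at hidx; exact ⟨j, rfl, hidx.symm⟩
            obtain ⟨h1, h2⟩ := (ih chk num h').2 j hj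
            refine ⟨?_, ?_⟩
            · simpa [rem, List.getD_cons_succ] using h1
            · simpa [List.set, rem] using h2

lemma getD_set_true : ∀ (chk : List Bool) (idx j : Nat), chk.getD j true = true →
    (chk.set idx true).getD j true = true := by
  intro chk
  induction chk with
  | nil => intro idx j h; simpa using h
  | cons c cs ih =>
    intro idx j h
    cases idx with
    | zero =>
      cases j with
      | zero => simp [List.set]
      | succ j => simpa [List.set, List.getD_cons_succ] using h
    | succ idx =>
      cases j with
      | zero => simpa [List.set, List.getD_cons_zero] using h
      | succ j =>
        simp only [List.set, List.getD_cons_succ] at h ⊢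
        exact ih idx j h

lemma getD_set_self : ∀ (chk : List Bool) (i : Nat), i < chk.length →
    (chk.set i true).getD i true = true := by
  intro chk
  induction chk with
  | nil => intro i h; simp at h
  | cons c cs ih =>
    intro i h
    cases i with
    | zero => simp [List.set]
    | succ i =>
      simp only [List.set, List.getD_cons_succ]
      exact ih i (by simpa using h)

lemma recA_sim (p : List Int) : ∀ (fuel : Nat) (chk : List Bool) (num : Int),
    chk.length = p.length →
    (recursiveA fuel p num chk 0).1 = (chainAbs fuel num (rem p chk)).1
    ∧ (recursiveA fuel p num chk 0).2.length = p.length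
    ∧ rem p (recursiveA fuel p num chk 0).2 = (chainAbs fuel num (rem p chk)).2
    ∧ ∀ j, chk.getD j true = true → (recursiveA fuel p num chk 0).2.getD j true = true := by
  intro fuel
  induction fuel with
  | zero =>
    intro chk num h
    exact ⟨rfl, h, rfl, fun j hj => hj⟩
  | succ fuel ih =>
    intro chk num h
    cases hf : findIdxA p chk num with
    | none =>
      have h1 := (find_step p chk num h).1 hf
      refine ⟨?_, ?_, ?_, ?_⟩
      · simp [recursiveA, hf, chainAbs, h1]
      · simpa [recursiveA, hf] using h
      · simp [recursiveA, hf, chainAbs, h1]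
      · intro j hj
        simpa [recursiveA, hf] using hj
    | some idx =>
      obtain ⟨hfa, hrem⟩ := (find_step p chk num h).2 idx hf
      have hlen : (chk.set idx true).length = p.length := by simpa using h
      obtain ⟨ih1, ih2, ih3, ih4⟩ := ih (chk.set idx true) (p.getD idx 0) hlen
      refine ⟨?_, ?_, ?_, ?_⟩
      · simp only [recursiveA, hf, chainAbs, hfa]
        rw [hrem] at ih1
        simp only [ih1]
        omega
      · simpa only [recursiveA, hf] using ih2
      · simp only [recursiveA, hf, chainAbs, hfa]
        rw [hrem] at ih3
        exact ih3
      · intro j hj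
        simp only [recursiveA, hf]
        exact ih4 j (getD_set_true chk idx j hj)

lemma firstAbove?_some_lt : ∀ (R : List Int) (num v : Int), firstAbove? num R = some v → num < v := by
  intro R
  induction R with
  | nil => intro num v h; simp [firstAbove?] at h
  | cons x xs ih =>
    intro num v h
    by_cases hx : num < x
    · simp [firstAbove?, hx] at h; omega
    · simp [firstAbove?, hx] at h; exact ih num v h

lemma chainAbs_cons_le : ∀ (fuel : Nat) (x num : Int) (xs : List Int), ¬ num < x →
    chainAbs fuel num (x :: xs) = ((chainAbs fuel num xs).1, x :: (chainAbs fuel num xs).2) := by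
  intro fuel
  induction fuel with
  | zero => intro x num xs h; simp [chainAbs]
  | succ fuel ih =>
    intro x num xs h
    have hfa : firstAbove? num (x :: xs) = firstAbove? num xs := by
      simp [firstAbove?, h]
    cases hf : firstAbove? num xs with
    | none => simp [chainAbs, hfa, hf]
    | some v =>
      have hv : num < v := firstAbove?_some_lt xs num v hf
      have h2 : ¬ v < x := by omega
      simp only [chainAbs, hfa, hf, removeAbove1, if_neg h]
      rw [ih x v (removeAbove1 num xs) h2]

lemma chainAbs_spec : ∀ (R : List Int) (fuel : Nat) (num : Int), R.length ≤ fuel →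
    chainAbs fuel num R = (dAbove num R, eraseAbove num R) := by
  intro R
  induction R with
  | nil => intro fuel num _; cases fuel <;> simp [chainAbs, firstAbove?, dAbove, eraseAbove]
  | cons x xs ih =>
    intro fuel num h
    obtain ⟨f, rfl⟩ : ∃ f, fuel = f + 1 := by
      cases fuel
      · simp at h
      · exact ⟨_, rfl⟩
    by_cases hx : num < x
    · simp only [chainAbs, firstAbove?, if_pos hx, removeAbove1]
      rw [ih f x (by simpa using h)]
      simp [dAbove, eraseAbove, hx]
      omega
    · rw [chainAbs_cons_le (f+1) x num xs hx]
      rw [ih (f+1) num (by simp at h ⊢; omega)]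
      simp [dAbove, eraseAbove, hx]

lemma rem_length_le : ∀ (p : List Int) (chk : List Bool), (rem p chk).length ≤ p.length := by
  intro p
  induction p with
  | nil => intro chk; cases chk <;> simp [rem]
  | cons x p ih =>
    intro chk
    cases chk with
    | nil => simp [rem]
    | cons b chk =>
      cases b <;> simp [rem] <;> have := ih chk <;> omega

lemma rem_nil : ∀ (p : List Int) (chk : List Bool), chk.length = p.length →
    (∀ j, j < p.length → chk.getD j true = true) → rem p chk = [] := by
  intro p
  induction p with
  | nil => intro chk h _; cases chk <;> simp [rem]
  | cons x p ih =>
    intro chk h hall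
    cases chk with
    | nil => simp at h
    | cons b chk =>
      have hb : b = true := by simpa using hall 0 (by simp)
      subst hb
      simp only [rem, if_pos rfl]
      exact ih chk (by simpa using h) (fun j hj => by simpa using hall (j+1) (by simpa using hj))

lemma rem_head : ∀ (p : List Int) (chk : List Bool) (i : Nat), chk.length = p.length →
    i < p.length → (∀ j, j < i → chk.getD j true = true) → chk.getD i true = false →
    rem p chk = p.getD i 0 :: rem p (chk.set i true) := by
  intro p
  induction p with
  | nil => intro chk i _ hi _ _; simp at hi
  | cons x p ih =>
    intro chk i h hi hall hc
    cases chk with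
    | nil => simp at h
    | cons b chk =>
      cases i with
      | zero =>
        have hb : b = false := by simpa using hc
        subst hb
        simp [rem, List.set]
      | succ i =>
        have hb : b = true := by simpa using hall 0 (by omega)
        subst hb
        simp only [rem, if_pos rfl, List.set, List.getD_cons_succ]
        exact ih chk i (by simpa using h) (by simpa using hi)
          (fun j hj => by simpa using hall (j+1) (by omega)) (by simpa using hc)

lemma eraseAbove_sublist : ∀ (L : List Int) (num : Int), (eraseAbove num L).Sublist L := by
  intro L
  induction L with
  | nil => intro num; simp [eraseAbove]
  | cons x xs ih =>
    intro num
    by_cases hx : num < x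
    · simp only [eraseAbove, if_pos hx]
      exact (ih x).trans (List.sublist_cons_self x xs)
    · simp only [eraseAbove, if_neg hx]
      exact (ih num).cons₂ x

lemma outerAbs_eq_of_le : ∀ (f f' : Nat) (R : List Int), R.length ≤ f → R.length ≤ f' →
    outerAbs f R = outerAbs f' R := by
  intro f
  induction f with
  | zero =>
    intro f' R h _
    have : R = [] := List.eq_nil_of_length_eq_zero (by omega)
    subst this
    cases f' <;> simp [outerAbs]
  | succ f ih =>
    intro f' R h h'
    cases R with
    | nil => cases f' <;> simp [outerAbs]
    | cons x xs =>
      obtain ⟨f'', rfl⟩ : ∃ f'', f' = f'' + 1 := by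
        cases f'
        · simp at h'
        · exact ⟨_, rfl⟩
      simp only [outerAbs]
      congr 1
      have hE : (eraseAbove x xs).length ≤ xs.length := (eraseAbove_sublist xs x).length_le
      exact ih f'' (eraseAbove x xs) (by simp at h; omega) (by simp at h'; omega)

lemma solLoop_sim (p : List Int) : ∀ (n i : Nat) (chk : List Bool) (a : Int),
    p.length - i = n → chk.length = p.length → (∀ j, j < i → chk.getD j true = true) →
    solLoopA p i chk a = a + outerAbs (rem p chk).length (rem p chk) := by
  intro n
  induction n with
  | zero =>
    intro i chk a hn h hall
    have hi : ¬ i < p.length := by omega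
    rw [solLoopA, dif_neg hi]
    have hr : rem p chk = [] := rem_nil p chk h (fun j hj => hall j (by omega))
    simp [hr, outerAbs]
  | succ n ih =>
    intro i chk a hn h hall
    have hi : i < p.length := by omega
    rw [solLoopA, dif_pos hi]
    by_cases hc : chk.getD i true = false
    · rw [if_pos hc]
      have hrem := rem_head p chk i h hi hall hc
      have hlen1 : (chk.set i true).length = p.length := by simpa using h
      obtain ⟨s1, s2, s3, s4⟩ := recA_sim p p.length (chk.set i true) (p.getD i 0) hlen1
      have hR'len : (rem p (chk.set i true)).length ≤ p.length := rem_length_le p _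
      have hch := chainAbs_spec (rem p (chk.set i true)) p.length (p.getD i 0) hR'len
      rw [hch] at s1 s3
      rw [ih (i+1) _ _ (by omega) s2 ?hall']
      case hall' =>
        intro j hj
        rcases Nat.lt_or_ge j i with hji | hji
        · exact s4 j (getD_set_true chk i j (hall j hji))
        · have hji' : j = i := by omega
          subst hji'
          exact s4 j (getD_set_self chk j (by omega))
      rw [s3, s1, hrem]
      have hE : (eraseAbove (p.getD i 0) (rem p (chk.set i true))).length ≤
          (rem p (chk.set i true)).length := (eraseAbove_sublist _ _).length_le
      rw [outerAbs_eq_of_le _ _ _ le_rfl (le_of_eq rfl)]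
      simp only [List.length_cons, outerAbs]
      rw [outerAbs_eq_of_le (rem p (chk.set i true)).length
        (eraseAbove (p.getD i 0) (rem p (chk.set i true))).length _ hE le_rfl]
      ring
    · rw [if_neg hc]
      have hc' : chk.getD i true = true := by
        cases hcv : chk.getD i true
        · exact absurd hcv hc
        · rfl
      exact ih (i+1) chk a (by omega) h
        (fun j hj => by
          rcases Nat.lt_or_ge j i with hji | hji
          · exact hall j hji
          · have : j = i := by omega
            subst this; exact hc')

lemma len_eraseAbove : ∀ (L : List Int) (num : Int),
    ((eraseAbove num L).length : Int) = (L.length : Int) - dAbove num L := by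
  intro L
  induction L with
  | nil => intro num; simp [eraseAbove, dAbove]
  | cons x xs ih =>
    intro num
    by_cases hx : num < x
    · simp only [eraseAbove, dAbove, if_pos hx, List.length_cons]
      have := ih x
      push_cast
      omega
    · simp only [eraseAbove, dAbove, if_neg hx, List.length_cons]
      have := ih num
      push_cast
      omega

lemma count_eraseAbove : ∀ (L : List Int) (num : Int), L.Pairwise (· ≤ ·) → ∀ (y : Int),
    (eraseAbove num L).count y + (if num < y ∧ y ∈ L then 1 else 0) = L.count y := by
  intro L
  induction L with
  | nil => intro num _ y; simp [eraseAbove]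
  | cons z zs ih =>
    intro num hs y
    obtain ⟨hz, hzs⟩ := List.pairwise_cons.mp hs
    by_cases hzx : num < z
    · rw [eraseAbove, if_pos hzx]
      have IH := ih z hzs y
      by_cases hyz : y = z
      · subst hyz
        have hind : ¬ (y < y ∧ y ∈ zs) := by omega
        rw [if_neg hind] at IH
        have : (if num < y ∧ y ∈ y :: zs then 1 else 0) = 1 := by
          rw [if_pos ⟨hzx, List.mem_cons_self⟩]
        rw [this]
        simp [List.count_cons_self]
        omega
      · by_cases hym : y ∈ zs
        · have hzy : z < y := lt_of_le_of_ne (hz y hym) (fun h => hyz h.symm)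
          rw [if_pos ⟨hzy, hym⟩] at IH
          have : (if num < y ∧ y ∈ z :: zs then 1 else 0) = 1 := by
            rw [if_pos ⟨by omega, List.mem_cons_of_mem z hym⟩]
          rw [this]
          have hzy0 : (z == y) = false := beq_eq_false_iff_ne.mpr (Ne.symm hyz)
          rw [List.count_cons, hzy0, if_neg Bool.false_ne_true]
          omega
        · have hym' : ¬ y ∈ z :: zs := by simp [hyz, hym]
          rw [if_neg (by tauto)] at IH
          rw [if_neg (by tauto)]
          have hzy0 : (z == y) = false := beq_eq_false_iff_ne.mpr (Ne.symm hyz)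
          rw [List.count_cons, hzy0, if_neg Bool.false_ne_true]
          omega
    · rw [eraseAbove, if_neg hzx]
      have IH := ih num hzs y
      by_cases hyz : y = z
      · subst hyz
        have h1 : ¬ (num < y ∧ y ∈ y :: zs) := fun h => hzx h.1
        have h2 : ¬ (num < y ∧ y ∈ zs) := fun h => hzx h.1
        rw [if_neg h1]
        rw [if_neg h2] at IH
        simp only [List.count_cons_self]
        omega
      · have hzy0 : (z == y) = false := beq_eq_false_iff_ne.mpr (Ne.symm hyz)
        rw [List.count_cons, List.count_cons, hzy0, if_neg Bool.false_ne_true]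
        have hmem : (num < y ∧ y ∈ z :: zs) ↔ (num < y ∧ y ∈ zs) := by
          constructor
          · rintro ⟨h1, h2⟩
            rcases List.mem_cons.mp h2 with h3 | h3
            · exact absurd h3 hyz
            · exact ⟨h1, h3⟩
          · rintro ⟨h1, h2⟩
            exact ⟨h1, List.mem_cons_of_mem z h2⟩
        by_cases hcond : num < y ∧ y ∈ zs
        · rw [if_pos (hmem.mpr hcond)]
          rw [if_pos hcond] at IH
          omega
        · rw [if_neg (fun h => hcond (hmem.mp h))]
          rw [if_neg hcond] at IH
          omega

lemma count_le_maxCnt (L : List Int) (y : Int) (h : y ∈ L) : L.count y ≤ maxCnt L :=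
  Finset.le_sup (f := fun y => L.count y) (List.mem_toFinset.mpr h)

lemma maxCnt_pos (L : List Int) (y : Int) (h : y ∈ L) : 1 ≤ maxCnt L := by
  have h1 : 1 ≤ L.count y := List.count_pos_iff.mpr h
  exact h1.trans (count_le_maxCnt L y h)

lemma maxCnt_erase (x : Int) (xs : List Int) (hs : (x :: xs).Pairwise (· ≤ ·)) :
    maxCnt (eraseAbove x xs) = maxCnt (x :: xs) - 1 := by
  obtain ⟨hz, hzs⟩ := List.pairwise_cons.mp hs
  have key : ∀ y, y ∈ (x :: xs) → (eraseAbove x xs).count y + 1 = (x :: xs).count y := by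
    intro y hy
    have IH := count_eraseAbove xs x hzs y
    rcases List.mem_cons.mp hy with rfl | hym
    · have : ¬ (y < y ∧ y ∈ xs) := by omega
      rw [if_neg this] at IH
      simp only [List.count_cons_self]
      omega
    · by_cases hyx : y = x
      · subst hyx
        have : ¬ (y < y ∧ y ∈ xs) := by omega
        rw [if_neg this] at IH
        simp only [List.count_cons_self]
        omega
      · have hxy : x < y := lt_of_le_of_ne (hz y hym) (fun h => hyx h.symm)
        rw [if_pos ⟨hxy, hym⟩] at IH
        have hxy0 : (x == y) = false := beq_eq_false_iff_ne.mpr (Ne.symm hyx)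
        rw [List.count_cons, hxy0, if_neg Bool.false_ne_true]
        omega
  have sub : ∀ y, y ∈ eraseAbove x xs → y ∈ x :: xs := by
    intro y hy
    exact List.mem_cons_of_mem x ((eraseAbove_sublist xs x).subset hy)
  apply Nat.le_antisymm
  · apply Finset.sup_le
    intro y hy
    have hyE := List.mem_toFinset.mp hy
    have hyR := sub y hyE
    have h1 := key y hyR
    have h2 := count_le_maxCnt (x :: xs) y hyR
    omega
  · obtain ⟨y, hy, hsup⟩ := Finset.exists_mem_eq_sup ((x :: xs).toFinset)
      ⟨x, List.mem_toFinset.mpr List.mem_cons_self⟩ (fun y => (x :: xs).count y)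
    have hyR := List.mem_toFinset.mp hy
    have hkey := key y hyR
    by_cases h2 : 2 ≤ (x :: xs).count y
    · have hyE : y ∈ eraseAbove x xs := by
        have : 1 ≤ (eraseAbove x xs).count y := by omega
        exact List.count_pos_iff.mp this
      have h3 := count_le_maxCnt (eraseAbove x xs) y hyE
      have : maxCnt (x :: xs) = (x :: xs).count y := hsup
      omega
    · have : maxCnt (x :: xs) = (x :: xs).count y := hsup
      omega

lemma outer_spec : ∀ (n fuel : Nat) (R : List Int), R.length ≤ n → R.length ≤ fuel →
    R.Pairwise (· ≤ ·) → outerAbs fuel R = (R.length : Int) - (maxCnt R : Int) := by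
  intro n
  induction n with
  | zero =>
    intro fuel R h _ _
    have : R = [] := List.eq_nil_of_length_eq_zero (by omega)
    subst this
    cases fuel <;> simp [outerAbs, maxCnt]
  | succ n ih =>
    intro fuel R h hf hs
    cases R with
    | nil => cases fuel <;> simp [outerAbs, maxCnt]
    | cons x xs =>
      obtain ⟨f, rfl⟩ : ∃ f, fuel = f + 1 := by
        cases fuel
        · simp at hf
        · exact ⟨_, rfl⟩
      simp only [outerAbs]
      have hE : (eraseAbove x xs).length ≤ xs.length := (eraseAbove_sublist xs x).length_le
      have hsE : (eraseAbove x xs).Pairwise (· ≤ ·) :=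
        List.Pairwise.sublist (eraseAbove_sublist xs x) (List.pairwise_cons.mp hs).2
      rw [ih f (eraseAbove x xs) (by simp at h; omega) (by simp at hf; omega) hsE]
      rw [maxCnt_erase x xs hs]
      have hlen := len_eraseAbove xs x
      have hpos : 1 ≤ maxCnt (x :: xs) := maxCnt_pos _ x List.mem_cons_self
      have hcast : ((maxCnt (x :: xs) - 1 : Nat) : Int) = (maxCnt (x :: xs) : Int) - 1 := by
        omega
      rw [hcast]
      simp only [List.length_cons]
      push_cast
      omega

lemma rem_replicate : ∀ (p : List Int), rem p (List.replicate p.length false) = p := by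
  intro p
  induction p with
  | nil => simp [rem]
  | cons x p ih => simpa [List.replicate, rem] using ih

lemma maxCnt_perm (L1 L2 : List Int) (h : L1.Perm L2) : maxCnt L1 = maxCnt L2 := by
  unfold maxCnt
  have hfin : L1.toFinset = L2.toFinset := by
    ext y
    simp [List.mem_toFinset, h.mem_iff]
  rw [hfin]
  exact Finset.sup_congr rfl (fun y _ => h.count_eq y)

lemma solution_eq (p : List Int) :
    solution p = (p.length : Int) - (maxCnt p : Int) := by
  unfold solution
  have hperm := PySem.List.sorted_perm p (fun x => x) false
  have hlen : (PySem.List.sorted p (fun x => x) false).length = p.length := hperm.length_eq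
  rw [solLoop_sim (PySem.List.sorted p (fun x => x) false)
    ((PySem.List.sorted p (fun x => x) false).length) 0 _ 0 (by omega)
    (by simp) (by omega)]
  rw [rem_replicate]
  have hpw : (PySem.List.sorted p (fun x => x) false).Pairwise (· ≤ ·) := by
    simpa using PySem.List.sorted_pairwise p (fun x => x)
  rw [outer_spec (PySem.List.sorted p (fun x => x) false).length
    (PySem.List.sorted p (fun x => x) false).length _ le_rfl le_rfl hpw]
  rw [maxCnt_perm _ _ hperm, hlen]
  ring

lemma maxCnt_append_singleton (pref : List Int) (x : Int) :
    maxCnt (pref ++ [x]) = max (maxCnt pref) ((pref ++ [x]).count x) := by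
  apply Nat.le_antisymm
  · apply Finset.sup_le
    intro y hy
    have hym := List.mem_toFinset.mp hy
    rcases List.mem_append.mp hym with hyp | hyx
    · by_cases hyx' : y = x
      · subst hyx'
        exact le_max_of_le_right le_rfl
      · have h0 : List.count y [x] = 0 := List.count_eq_zero.mpr (by simp [hyx'])
        have : (pref ++ [x]).count y = pref.count y := by
          rw [List.count_append, h0]
          omega
        rw [this]
        exact le_max_of_le_left (count_le_maxCnt pref y hyp)
    · have : y = x := by simpa using hyx
      subst this
      exact le_max_of_le_right le_rfl
  · apply max_le
    · apply Finset.sup_le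
      intro y hy
      have hym := List.mem_toFinset.mp hy
      have h1 : pref.count y ≤ (pref ++ [x]).count y := by
        rw [List.count_append]; omega
      exact h1.trans (count_le_maxCnt _ y (List.mem_append_left _ hym))
    · exact count_le_maxCnt _ x (List.mem_append_right _ List.mem_cons_self)

lemma foldB : ∀ (L pref : List Int) (d : PySem.Dict Int Int) (b : Int),
    (∀ y, d.getD y 0 = (pref.count y : Int)) → b = (maxCnt pref : Int) →
    (L.foldl (fun (st : PySem.Dict Int Int × Int) x =>
      let c := st.1.getD x 0 + 1
      (st.1.insert x c, if st.2 < c then c else st.2)) (d, b)).2 = (maxCnt (pref ++ L) : Int) := by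
  intro L
  induction L with
  | nil =>
    intro pref d b _ hb
    simpa using hb
  | cons x L ih =>
    intro pref d b hd hb
    simp only [List.foldl_cons]
    have hc : d.getD x 0 + 1 = ((pref ++ [x]).count x : Int) := by
      have h1 : List.count x [x] = 1 := by simp
      rw [hd x, List.count_append, h1]
      push_cast
      ring
    have hd' : ∀ y, (d.insert x (d.getD x 0 + 1)).getD y 0 = ((pref ++ [x]).count y : Int) := by
      intro y
      rw [PySem.Dict.getD_insert]
      by_cases hyx : y = x
      · subst hyx
        rw [if_pos rfl, hc]
      · have h0 : List.count y [x] = 0 := List.count_eq_zero.mpr (by simp [hyx])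
        rw [if_neg hyx, hd y, List.count_append, h0]
        push_cast
        ring
    have hb' : (if b < d.getD x 0 + 1 then d.getD x 0 + 1 else b) = (maxCnt (pref ++ [x]) : Int) := by
      rw [maxCnt_append_singleton, hb, hc]
      push_cast [Nat.cast_max]
      split_ifs <;> omega
    have := ih (pref ++ [x]) _ _ hd' hb'
    simpa [List.append_assoc] using this

lemma solution_alt_eq (p : List Int) :
    solution_alt p = (p.length : Int) - (maxCnt p : Int) := by
  unfold solution_alt
  rw [foldB p [] PySem.Dict.empty 0
    (fun y => by simp [PySem.Dict.getD_empty])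
    (by simp [maxCnt])]
  simp

-- ===== VERDICT (by name: the statement is the Claim_ definition above) =====
theorem solution_spec : Claim_equal_solution := by
  intro p _ _
  unfold Spec_solution
  rw [solution_eq, solution_alt_eq]
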